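-- pv_equiv track=rewrite | github.com/QI1002/exampool | Leetcode/591.py | getStartTag
-- ===== SOURCE A (Python) =====
-- def getStartTag(s, i):
--     for j in range(i+1, len(s), 1):
--         if (s[j] == ">"):
--             if ((j-i) >= 10): return None
--             for k in range(i+1, j, 1):
--                 if (ord(s[k]) > ord('Z')): return None
--                 if (ord(s[k]) < ord('A')): return None
--             return s[i+1:j]
--
--     return None
-- ===== SOURCE B (Python) =====
-- import re
--
-- # A valid start tag at position i is "<NAME>" where NAME is 1..? uppercase letters;
-- # A accepts 0..8 uppercase chars between position i+1 and the first '>'.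
-- _TAG = re.compile(r'([A-Z]{0,8})>')
--
-- def getStartTag(s, i):
--     m = _TAG.match(s, i + 1)
--     return m.group(1) if m is not None else None
-- ===== Notes on version B (the rewrite author's own statement) =====
-- stated objective: idiomatic
-- what changed: Replaces the manual two-level scan (find '>' then re-validate the prefix char by char) with a single anchored compiled-regex match r'([A-Z]{0,8})>' at position i+1 (the C regex engine scans once, a constant-factor win over the Python-level loops).
-- outside the precondition, e.g. on getStartTag('A>b', -3): A returns '', B returns 'A'; on getStartTag('ab', -5): A raises IndexError, B returns None
import Mathlib
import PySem

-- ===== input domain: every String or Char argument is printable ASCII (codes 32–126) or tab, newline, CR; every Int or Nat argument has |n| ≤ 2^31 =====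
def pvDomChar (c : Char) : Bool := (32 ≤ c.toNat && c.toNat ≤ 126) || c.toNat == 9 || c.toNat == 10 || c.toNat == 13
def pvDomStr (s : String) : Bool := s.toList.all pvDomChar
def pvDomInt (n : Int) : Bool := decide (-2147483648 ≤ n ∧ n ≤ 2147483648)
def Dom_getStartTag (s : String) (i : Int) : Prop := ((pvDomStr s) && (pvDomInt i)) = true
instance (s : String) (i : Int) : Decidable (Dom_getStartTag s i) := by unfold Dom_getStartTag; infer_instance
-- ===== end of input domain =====

-- B replaces A's manual two-level scan with a single anchored pattern match (regex ([A-Z]{0,8})> at i+1): idiomatic one-pass rewrite, same cost.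


-- ===== PORT A =====
-- inner loop: "for k in range(i+1, j, 1): if ord(s[k]) > ord('Z') or < ord('A'): return None"
def pvA_inner (cs : List Char) : List Int → Bool
  | [] => true
  | k :: ks =>
    match PySem.List.pyGet? cs k with
    | none => false          -- IndexError (unreachable inside Pre_)
    | some c =>
      if c.toNat > 90 then false
      else if c.toNat < 65 then false
      else pvA_inner cs ks

-- outer loop: "for j in range(i+1, len(s), 1): if s[j] == '>': …"
def pvA_outer (cs : List Char) (i : Int) : List Int → Option String
  | [] => none
  | j :: js =>
    match PySem.List.pyGet? cs j with
    | none => none           -- IndexError (unreachable inside Pre_)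
    | some c =>
      if c = '>' then
        if j - i ≥ 10 then none
        else if pvA_inner cs (PySem.List.pyRange (i+1) j 1) then
          some (String.ofList (PySem.List.slice cs (some (i+1)) (some j)))
        else none
      else pvA_outer cs i js

def getStartTag (s : String) (i : Int) : Option String :=
  pvA_outer s.toList i (PySem.List.pyRange (i+1) (s.toList.length : Int) 1)

-- ===== PORT B =====
-- Hand-ported matcher for the compiled regex ([A-Z]{0,8})> anchored at a position:
-- since [A-Z] and '>' are disjoint character classes, the greedy match is exactly this
-- deterministic left-to-right scan with a budget of 8 (exact for this pattern).
def pvB_go : List Char → Nat → List Char → Option String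
  | [], _, _ => none
  | c :: rest, budget, acc =>
    if c = '>' then some (String.ofList acc.reverse)
    else if budget = 0 then none
    else if 'A' ≤ c ∧ c ≤ 'Z' then pvB_go rest (budget - 1) (c :: acc)
    else none

def getStartTag_alt (s : String) (i : Int) : Option String :=
  -- _TAG.match(s, i + 1): inside Pre_ (i ≥ -1) the start position i+1 is ≥ 0, and .toNat is exact
  pvB_go (s.toList.drop (i + 1).toNat) 8 []

-- ===== PRECONDITION & SPEC =====
-- Pre_ restricts to the natural domain of start positions i ≥ -1 (scan starts at i+1 ≥ 0):
-- for i ≤ -2 Python A either raises IndexError (i+1 < -len(s)) or scans via negative-index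
-- wraparound from the end of the string, which is outside the task's natural domain.
def Pre_getStartTag (s : String) (i : Int) : Prop := -1 ≤ i
instance (s : String) (i : Int) : Decidable (Pre_getStartTag s i) := by unfold Pre_getStartTag; infer_instance

def pvWitness_getStartTag : String × Int := ("<DIV>x", 0)

def Spec_getStartTag (s : String) (i : Int) (out : Option String) : Prop := out = getStartTag_alt s i
instance (s : String) (i : Int) (out : Option String) : Decidable (Spec_getStartTag s i out) := by unfold Spec_getStartTag; infer_instance

-- ===== CLAIM (what is proved, stated in full; the proofs are below) =====
def Claim_equal_getStartTag : Prop := ∀ (s : String) (i : Int), Dom_getStartTag s i → Pre_getStartTag s i → Spec_getStartTag s i (getStartTag s i)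

-- ===== LEMMAS AND PROOFS =====

-- a "good" character for the tag name: uppercase A..Z
def pvGood (c : Char) : Prop := 65 ≤ c.toNat ∧ c.toNat ≤ 90

theorem pvA_inner_true_iff (cs : List Char) (l : List Int) :
    pvA_inner cs l = true ↔ ∀ j ∈ l, ∃ c, PySem.List.pyGet? cs j = some c ∧ pvGood c := by
  induction l with
  | nil => simp [pvA_inner]
  | cons j js ih =>
    simp only [pvA_inner]
    cases h : PySem.List.pyGet? cs j with
    | none => simp [h]
    | some c =>
      by_cases h1 : c.toNat > 90
      · simp only [if_pos h1]
        constructor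
        · intro hf; exact absurd hf (by simp)
        · intro hall
          obtain ⟨c', hc', hg⟩ := hall j (by simp)
          rw [h] at hc'; cases hc'
          exact absurd hg (by unfold pvGood; omega)
      · simp only [if_neg h1]
        by_cases h2 : c.toNat < 65
        · simp only [if_pos h2]
          constructor
          · intro hf; exact absurd hf (by simp)
          · intro hall
            obtain ⟨c', hc', hg⟩ := hall j (by simp)
            rw [h] at hc'; cases hc'
            exact absurd hg (by unfold pvGood; omega)
        · simp only [if_neg h2, ih]
          constructor
          · intro hall j' hj'
            rcases List.mem_cons.mp hj' with rfl | hm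
            · exact ⟨c, h, by unfold pvGood; omega⟩
            · exact hall j' hm
          · intro hall j' hj'
            exact hall j' (List.mem_cons_of_mem _ hj')

-- If some position in [p, q) is not a good char, or q - p ≥ 9, A's scan from q returns none.
theorem pvA_none (t cs : List Char) (p q : Nat) (hpq : p ≤ q) (ht : cs.drop q = t)
    (hbad : (∃ m : Nat, p ≤ m ∧ m < q ∧ ∃ c, cs[m]? = some c ∧ ¬ pvGood c) ∨ 9 ≤ q - p) :
    pvA_outer cs ((p : Int) - 1) (PySem.List.pyRange (q : Int) (cs.length : Int) 1) = none := by
  induction t generalizing q with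
  | nil =>
    have : cs.length ≤ q := by
      have := congrArg List.length ht; simp at this; omega
    rw [PySem.List.pyRange_one_eq_nil (by exact_mod_cast this)]
    simp [pvA_outer]
  | cons c t' ih =>
    have hq : q < cs.length := by
      have := congrArg List.length ht; simp at this; omega
    have hget : cs[q]? = some c := by
      have h : (cs.drop q)[0]? = some c := by rw [ht]; rfl
      rwa [List.getElem?_drop, Nat.add_zero] at h
    rw [PySem.List.pyRange_one_cons (by exact_mod_cast hq), pvA_outer]
    have hpg : PySem.List.pyGet? cs (q : Int) = some c := by
      rw [PySem.List.pyGet?_natCast, hget]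
    rw [hpg]
    have hdrop' : cs.drop (q + 1) = t' := by
      have : cs.drop (q + 1) = (cs.drop q).drop 1 := by
        rw [List.drop_drop]
      rw [this, ht]; rfl
    by_cases hc : c = '>'
    · simp only [if_pos hc]
      by_cases hlen : (q : Int) - ((p : Int) - 1) ≥ 10
      · simp [hlen]
      · simp only [if_neg hlen]
        have hqp : ¬ (9 ≤ q - p) := by omega
        rcases hbad with ⟨m, hm1, hm2, cm, hcm, hbadm⟩ | h9
        · have hfalse : pvA_inner cs (PySem.List.pyRange ((p : Int) - 1 + 1) (q : Int) 1) = false := by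
            rw [show ((p : Int) - 1 + 1) = (p : Int) by ring]
            by_contra hne
            have htrue : pvA_inner cs (PySem.List.pyRange (p : Int) (q : Int) 1) = true := by
              cases hv : pvA_inner cs (PySem.List.pyRange (p : Int) (q : Int) 1)
              · exact absurd hv hne
              · rfl
            have := (pvA_inner_true_iff cs _).mp htrue (m : Int)
              (by rw [PySem.List.mem_pyRange_one]; omega)
            obtain ⟨c', hc', hg⟩ := this
            rw [PySem.List.pyGet?_natCast, hcm] at hc'
            cases hc'
            exact hbadm hg
          rw [hfalse]; simp
        · omega
    · simp only [if_neg hc]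
      have : ((q : Int) + 1) = ((q + 1 : Nat) : Int) := by push_cast; ring
      rw [this]
      exact ih (q + 1) (by omega) hdrop'
        (by rcases hbad with ⟨m, hm⟩ | h9
            · exact Or.inl ⟨m, hm.1, by omega, hm.2.2⟩
            · exact Or.inr (by omega))

theorem pvGood_iff (c : Char) : ('A' ≤ c ∧ c ≤ 'Z') ↔ pvGood c := by
  unfold pvGood
  constructor
  · intro ⟨h1, h2⟩
    exact ⟨Nat.le_of_lt_succ (Nat.lt_succ_of_le h1), h2⟩
  · intro ⟨h1, h2⟩
    exact ⟨h1, h2⟩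

-- Main invariant: A's scan from q equals B's scan of the suffix, given the prefix [p,q) is good and short.
theorem pvMain (t cs : List Char) (p q : Nat) (hpq : p ≤ q) (ht : cs.drop q = t)
    (hgood : ∀ m : Nat, p ≤ m → m < q → ∃ c, cs[m]? = some c ∧ pvGood c)
    (hcnt : q - p ≤ 8) :
    pvA_outer cs ((p : Int) - 1) (PySem.List.pyRange (q : Int) (cs.length : Int) 1)
      = pvB_go t (8 - (q - p)) (((cs.drop p).take (q - p)).reverse) := by
  induction t generalizing q with
  | nil =>
    have : cs.length ≤ q := by
      have := congrArg List.length ht; simp at this; omega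
    rw [PySem.List.pyRange_one_eq_nil (by exact_mod_cast this)]
    simp [pvA_outer, pvB_go]
  | cons c t' ih =>
    have hq : q < cs.length := by
      have := congrArg List.length ht; simp at this; omega
    have hget : cs[q]? = some c := by
      have h : (cs.drop q)[0]? = some c := by rw [ht]; rfl
      rwa [List.getElem?_drop, Nat.add_zero] at h
    rw [PySem.List.pyRange_one_cons (by exact_mod_cast hq), pvA_outer]
    have hpg : PySem.List.pyGet? cs (q : Int) = some c := by
      rw [PySem.List.pyGet?_natCast, hget]
    rw [hpg]
    have hdrop' : cs.drop (q + 1) = t' := by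
      have : cs.drop (q + 1) = (cs.drop q).drop 1 := by rw [List.drop_drop]
      rw [this, ht]; rfl
    by_cases hc : c = '>'
    · subst hc
      simp only [if_pos rfl]
      have hlen : ¬ ((q : Int) - ((p : Int) - 1) ≥ 10) := by omega
      rw [if_neg hlen]
      have htrue : pvA_inner cs (PySem.List.pyRange ((p : Int) - 1 + 1) (q : Int) 1) = true := by
        rw [show ((p : Int) - 1 + 1) = (p : Int) by ring]
        rw [pvA_inner_true_iff]
        intro j hj
        rw [PySem.List.mem_pyRange_one] at hj
        obtain ⟨c', hc', hg⟩ := hgood j.toNat (by omega) (by omega)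
        exact ⟨c', by rw [PySem.List.pyGet?_of_nonneg cs (by omega : (0:Int) ≤ j), hc'], hg⟩
      rw [htrue]
      simp only [if_true]
      rw [pvB_go]
      simp only [if_pos rfl]
      rw [show ((p : Int) - 1 + 1) = (p : Int) by ring]
      rw [PySem.List.slice_natCast]
      simp
    · simp only [if_neg hc]
      rw [pvB_go]
      simp only [if_neg hc]
      have hstep : ((q : Int) + 1) = ((q + 1 : Nat) : Int) := by push_cast; ring
      by_cases hg : 'A' ≤ c ∧ c ≤ 'Z'
      · by_cases hbudget : q - p = 8
        · -- budget exhausted: B says none; A recurses and dies on the length cap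
          have hb0 : 8 - (q - p) = 0 := by omega
          rw [hb0]
          simp only [if_pos rfl]
          rw [hstep]
          exact pvA_none t' cs p (q + 1) (by omega) hdrop' (Or.inr (by omega))
        · -- good char within budget: both advance
          have hb : ¬ (8 - (q - p) = 0) := by omega
          simp only [if_neg hb, if_pos hg]
          have hgood' : ∀ m : Nat, p ≤ m → m < q + 1 → ∃ c', cs[m]? = some c' ∧ pvGood c' := by
            intro m h1 h2
            by_cases hm : m = q
            · exact ⟨c, by rw [hm, hget], (pvGood_iff c).mp hg⟩
            · exact hgood m h1 (by omega)
          have hacc : ((cs.drop p).take (q + 1 - p)).reverse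
              = c :: ((cs.drop p).take (q - p)).reverse := by
            have hidx : (cs.drop p)[q - p]? = some c := by
              rw [List.getElem?_drop]
              rw [show p + (q - p) = q by omega, hget]
            rw [show q + 1 - p = (q - p) + 1 by omega, List.take_add_one, hidx]
            simp
          have := ih (q + 1) (by omega) hdrop' hgood' (by omega)
          rw [hstep, this, hacc]
          congr 1
          omega
      · -- bad char: B says none; A recurses and dies on the inner check
        have hbad : ¬ pvGood c := fun hG => hg ((pvGood_iff c).mpr hG)
        by_cases hb : 8 - (q - p) = 0
        · simp only [if_pos hb]
          rw [hstep]
          exact pvA_none t' cs p (q + 1) (by omega) hdrop' (Or.inr (by omega))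
        · simp only [if_neg hb, if_neg hg]
          rw [hstep]
          exact pvA_none t' cs p (q + 1) (by omega) hdrop'
            (Or.inl ⟨q, hpq, by omega, c, hget, hbad⟩)

-- ===== VERDICT (by name: the statement is the Claim_ definition above) =====
theorem getStartTag_spec : Claim_equal_getStartTag := by
  intro s i _ hpre
  unfold Spec_getStartTag getStartTag getStartTag_alt
  have hp : (i + 1) = (((i + 1).toNat : Nat) : Int) := by
    unfold Pre_getStartTag at hpre; omega
  set p := (i + 1).toNat with hpdef
  have hi : i = (p : Int) - 1 := by omega
  rw [hi, show ((p : Int) - 1 + 1) = (p : Int) by ring]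
  have := pvMain (s.toList.drop p) s.toList p p (le_refl p) rfl
    (by intro m h1 h2; omega) (by omega)
  simpa using this
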